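-- pv_equiv track=rewrite | github.com/alchemist1234/ParticleTracking | detection_functions.py | get_prev_c
-- ===== SOURCE A (Python) =====
-- def get_prev_c(data, num=1):
--     # Find the "num" center (counting from the back) in list "data" that is not "None".
--     counter = 1
--     found_counter = 0
--     l = len(data)
--     while counter <= l:
--         previous = data[-counter]
--         if previous != (None, None):
--             found_counter += 1
--             if found_counter == num:
--                 return previous, -counter
--         counter += 1
--     #    print 'damn'
--     #    print data
--     return (None, None), -counter
-- ===== SOURCE B (Python) =====
-- def get_prev_c(data, num=1):
--     # Forward pass: record the index of every real center, then take the num-th from the end.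
--     hits = [j for j, c in enumerate(data) if c != (None, None)]
--     if 1 <= num <= len(hits):
--         j = hits[-num]
--         return data[j], j - len(data)
--     return (None, None), -(len(data) + 1)
-- ===== Notes on version B (the rewrite author's own statement) =====
-- stated objective: alternative
-- what changed: Replaces A's back-to-front scan with mutable counters and negative indexing by a forward enumerate pass that records hit indices, then selects the num-th from the end with positive-index arithmetic.
import Mathlib
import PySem

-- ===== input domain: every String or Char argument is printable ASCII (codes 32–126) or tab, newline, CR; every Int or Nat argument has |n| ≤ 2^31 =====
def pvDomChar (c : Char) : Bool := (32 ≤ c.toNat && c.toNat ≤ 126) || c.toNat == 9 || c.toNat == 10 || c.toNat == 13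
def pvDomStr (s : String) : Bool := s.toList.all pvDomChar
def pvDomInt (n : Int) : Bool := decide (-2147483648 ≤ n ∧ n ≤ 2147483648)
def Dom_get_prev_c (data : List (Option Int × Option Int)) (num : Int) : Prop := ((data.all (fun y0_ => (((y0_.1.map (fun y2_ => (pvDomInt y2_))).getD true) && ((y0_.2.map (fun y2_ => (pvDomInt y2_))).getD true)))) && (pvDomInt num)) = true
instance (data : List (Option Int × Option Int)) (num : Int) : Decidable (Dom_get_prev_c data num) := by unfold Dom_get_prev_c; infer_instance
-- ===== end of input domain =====

-- B replaces A's back-to-front scan with mutable counters and negative indexing by a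
-- forward enumerate pass recording hit indices, then selecting the num-th from the end.

-- ===== PORT A =====
-- the while-loop of A; state = (counter, found_counter); index -counter is always in
-- range when counter ≤ len, so .getD (none, none) is never the defaulted branch
def get_prev_c_loop (data : List (Option Int × Option Int)) (num : Int)
    (counter : Nat) (found : Int) : (Option Int × Option Int) × Int :=
  if counter ≤ data.length then
    let previous := (PySem.List.pyGet? data (-(counter : Int))).getD (none, none)
    if previous ≠ (none, none) then
      if found + 1 = num then (previous, -(counter : Int))
      else get_prev_c_loop data num (counter + 1) (found + 1)
    else get_prev_c_loop data num (counter + 1) found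
  else ((none, none), -(counter : Int))
termination_by data.length + 1 - counter

def get_prev_c (data : List (Option Int × Option Int)) (num : Int) : (Option Int × Option Int) × Int :=
  get_prev_c_loop data num 1 0

-- ===== PORT B =====
def get_prev_c_alt (data : List (Option Int × Option Int)) (num : Int) : (Option Int × Option Int) × Int :=
  let hits := ((PySem.List.enumerate data 0).filter (fun p => decide (p.2 ≠ (none, none)))).map (fun p => p.1)
  if 1 ≤ num ∧ num ≤ (hits.length : Int) then
    let j := (PySem.List.pyGet? hits (-num)).getD 0
    ((PySem.List.pyGet? data j).getD (none, none), j - (data.length : Int))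
  else ((none, none), -((data.length : Int) + 1))

-- ===== PRECONDITION & SPEC =====
def Spec_get_prev_c (data : List (Option Int × Option Int)) (num : Int) (out : (Option Int × Option Int) × Int) : Prop := out = get_prev_c_alt data num
instance (data : List (Option Int × Option Int)) (num : Int) (out : (Option Int × Option Int) × Int) : Decidable (Spec_get_prev_c data num out) := by unfold Spec_get_prev_c; infer_instance

-- ===== CLAIM (what is proved, stated in full; the proofs are below) =====
def Claim_equal_get_prev_c : Prop := ∀ (data : List (Option Int × Option Int)) (num : Int), Dom_get_prev_c data num → Spec_get_prev_c data num (get_prev_c data num)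

-- ===== LEMMAS AND PROOFS =====

-- the qualifying back-offsets from position c onwards (A's view of the data)
def matchesFrom (data : List (Option Int × Option Int)) (c : Int) : List Int :=
  (PySem.List.pyRange c ((data.length : Int) + 1) 1).filter
      (fun i => decide ((PySem.List.pyGet? data (-i)).getD (none, none) ≠ (none, none)))

-- the selection A ends up performing, parametrised by the remaining count
def selectFrom (data : List (Option Int × Option Int)) (k : Int) (c : Int) : (Option Int × Option Int) × Int :=
  let ms := matchesFrom data c
  if 1 ≤ k ∧ k ≤ (ms.length : Int) then
    let j := (PySem.List.pyGet? ms (k - 1)).getD 0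
    ((PySem.List.pyGet? data (-j)).getD (none, none), -j)
  else ((none, none), -((data.length : Int) + 1))

-- B's forward hit list with an arbitrary enumerate start
def hitsFrom (data : List (Option Int × Option Int)) (s : Int) : List Int :=
  ((PySem.List.enumerate data s).filter (fun p => decide (p.2 ≠ (none, none)))).map (fun p => p.1)

lemma pyGet?_cons_pos {α : Type} (a : α) (tl : List α) (i : Int) (h : 1 ≤ i) :
    PySem.List.pyGet? (a :: tl) i = PySem.List.pyGet? tl (i - 1) := by
  obtain ⟨k, rfl⟩ : ∃ k : Nat, i = (k : Int) + 1 := ⟨(i - 1).toNat, by omega⟩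
  have e2 : ((k : Int) + 1) - 1 = ((k : Nat) : Int) := by ring
  have e1 : ((k : Int) + 1) = ((k + 1 : Nat) : Int) := by push_cast; ring
  rw [e2, e1, PySem.List.pyGet?_natCast, PySem.List.pyGet?_natCast]
  simp

lemma pyGet?_cons_zero {α : Type} (a : α) (tl : List α) :
    PySem.List.pyGet? (a :: tl) 0 = some a := by
  rw [show (0 : Int) = ((0 : Nat) : Int) from rfl, PySem.List.pyGet?_natCast]
  simp

lemma matchesFrom_cons (data : List (Option Int × Option Int)) (c : Int)
    (h : c ≤ (data.length : Int)) :
    matchesFrom data c =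
      (if ((PySem.List.pyGet? data (-c)).getD (none, none)) ≠ (none, none)
        then [c] else []) ++ matchesFrom data (c + 1) := by
  unfold matchesFrom
  rw [PySem.List.pyRange_one_cons (by omega)]
  by_cases hp : ((PySem.List.pyGet? data (-c)).getD (none, none)) ≠ (none, none) <;>
    simp [List.filter, hp]

lemma matchesFrom_nil (data : List (Option Int × Option Int)) (c : Int)
    (h : (data.length : Int) < c) : matchesFrom data c = [] := by
  unfold matchesFrom
  rw [PySem.List.pyRange_one_eq_nil (by omega)]
  rfl

lemma loop_eq_select_fuel (data : List (Option Int × Option Int)) (num : Int) :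
    ∀ n counter found, 1 ≤ counter → counter ≤ data.length + 1 →
      data.length + 1 - counter = n →
      get_prev_c_loop data num counter found = selectFrom data (num - found) counter := by
  intro n
  induction n with
  | zero =>
    intro counter found h1 h2 hn
    have hc : counter = data.length + 1 := by omega
    rw [get_prev_c_loop, if_neg (by omega)]
    unfold selectFrom
    rw [matchesFrom_nil data counter (by exact_mod_cast (by omega : data.length < counter))]
    rw [if_neg (by intro h; simp at h; omega)]
    simp [hc]
  | succ n ih =>
    intro counter found h1 h2 hn
    have hc : counter ≤ data.length := by omega
    rw [get_prev_c_loop, if_pos hc]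
    have hcons := matchesFrom_cons data counter (by exact_mod_cast hc)
    by_cases hp : ((PySem.List.pyGet? data (-(counter : Int))).getD (none, none)) ≠ (none, none)
    · simp only [if_pos hp]
      by_cases hf : found + 1 = num
      · -- hit: num - found = 1, and the head of matchesFrom is counter itself
        simp only [if_pos hf]
        unfold selectFrom
        rw [hcons, if_pos hp]
        have hk : num - found = 1 := by omega
        simp only [hk, List.cons_append, List.nil_append]
        have hlen : (1 : Int) ≤ ((((counter : Int) :: matchesFrom data ((counter : Int) + 1)).length : Nat) : Int) := by
          simp
        rw [if_pos ⟨le_refl 1, hlen⟩]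
        simp only [show (1 : Int) - 1 = 0 from rfl, pyGet?_cons_zero, Option.getD_some]
      · simp only [if_neg hf]
        rw [ih (counter + 1) (found + 1) (by omega) (by omega) (by omega)]
        unfold selectFrom
        rw [show ((counter + 1 : Nat) : Int) = (counter : Int) + 1 from by push_cast; ring]
        rw [hcons, if_pos hp]
        simp only [List.cons_append, List.nil_append]
        by_cases hk : 1 ≤ num - found ∧
            num - found ≤ ((((counter : Int) :: matchesFrom data ((counter : Int) + 1)).length : Nat) : Int)
        · rw [if_pos hk]
          have hlc := hk.2
          simp only [List.length_cons] at hlc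
          push_cast at hlc
          have hk2 : 1 ≤ num - (found + 1) ∧
              num - (found + 1) ≤ (((matchesFrom data ((counter : Int) + 1)).length : Nat) : Int) := by
            constructor
            · omega
            · omega
          rw [if_pos hk2]
          have hge : (1 : Int) ≤ num - found - 1 := by omega
          rw [pyGet?_cons_pos _ _ _ hge]
          have : num - found - 1 - 1 = num - (found + 1) - 1 := by ring
          rw [this]
        · rw [if_neg hk]
          have hk2 : ¬ (1 ≤ num - (found + 1) ∧
              num - (found + 1) ≤ (((matchesFrom data ((counter : Int) + 1)).length : Nat) : Int)) := by
            intro h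
            apply hk
            refine ⟨by omega, ?_⟩
            have h2' := h.2
            push_cast at h2' ⊢
            simp only [List.length_cons]
            push_cast
            omega
          rw [if_neg hk2]
    · simp only [if_neg hp]
      rw [ih (counter + 1) found (by omega) (by omega) (by omega)]
      unfold selectFrom
      rw [show ((counter + 1 : Nat) : Int) = (counter : Int) + 1 from by push_cast; ring]
      rw [hcons, if_neg hp]
      simp

-- hitsFrom decomposes structurally
lemma hitsFrom_cons (a : Option Int × Option Int) (tl : List (Option Int × Option Int)) (s : Int) :
    hitsFrom (a :: tl) s =
      (if a ≠ (none, none) then [s] else []) ++ hitsFrom tl (s + 1) := by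
  unfold hitsFrom
  rw [PySem.List.enumerate_cons]
  by_cases hp : a ≠ (none, none) <;> simp [List.filter, hp]

lemma hitsFrom_shift (data : List (Option Int × Option Int)) :
    ∀ s : Int, hitsFrom data s = (hitsFrom data 0).map (· + s) := by
  induction data with
  | nil => intro s; simp [hitsFrom, PySem.List.enumerate]
  | cons a tl ih =>
    intro s
    rw [hitsFrom_cons, hitsFrom_cons, List.map_append, ih (s + 1), ih (0 + 1), List.map_map]
    congr 1
    · by_cases hp : a ≠ (none, none) <;> simp [hp]
    · apply List.map_congr_left
      intro x _
      simp [Function.comp]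
      ring

-- negative access into a cons, staying in the tail's range
lemma pyGet?_neg_cons (a : Option Int × Option Int) (tl : List (Option Int × Option Int))
    (k : Nat) (h1 : 0 < k) (h2 : k ≤ tl.length) :
    PySem.List.pyGet? (a :: tl) (-(k : Int)) = PySem.List.pyGet? tl (-(k : Int)) := by
  rw [PySem.List.pyGet?_neg_natCast (a :: tl) k h1 (by simp; omega),
      PySem.List.pyGet?_neg_natCast tl k h1 h2]
  have h3 : (a :: tl).length - k = (tl.length - k) + 1 := by simp; omega
  rw [h3, List.getElem?_cons_succ]

-- the bridge: A's back-offset match list is B's forward hit list, reversed and re-indexed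
lemma matches_eq_hits (data : List (Option Int × Option Int)) :
    matchesFrom data 1 = ((hitsFrom data 0).reverse).map (fun j => (data.length : Int) - j) := by
  induction data with
  | nil =>
    rw [matchesFrom_nil _ _ (by simp)]
    simp [hitsFrom, PySem.List.enumerate]
  | cons a tl ih =>
    -- split the offset range 1..len+1 into 1..len (the tail) and len+1 (the head a)
    have hsplit : matchesFrom (a :: tl) 1 =
        matchesFrom tl 1 ++ (if a ≠ (none, none) then [(tl.length : Int) + 1] else []) := by
      unfold matchesFrom
      have hL : ((a :: tl).length : Int) + 1 = ((tl.length : Int) + 1) + 1 := by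
        simp [List.length_cons]
      rw [hL, PySem.List.pyRange_one_succ_right (by omega), List.filter_append]
      congr 1
      · -- on offsets 1..len tl the cons is invisible
        apply List.filter_congr
        intro c hc
        have hc' := PySem.List.mem_pyRange_one.mp hc
        obtain ⟨k, rfl⟩ : ∃ k : Nat, c = (k : Int) := ⟨c.toNat, by omega⟩
        have hk1 : 0 < k := by omega
        have hk2 : k ≤ tl.length := by omega
        simp only [pyGet?_neg_cons a tl k hk1 hk2]
      · -- offset len tl + 1 reaches the head a
        rw [List.filter_cons, List.filter_nil]
        have hget : PySem.List.pyGet? (a :: tl) (-((tl.length : Int) + 1)) = some a := by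
          rw [show -((tl.length : Int) + 1) = -(((tl.length + 1 : Nat) : Int)) from by push_cast; ring,
              PySem.List.pyGet?_neg_natCast (a :: tl) (tl.length + 1) (by omega) (by simp)]
          simp
        simp only [hget, Option.getD_some]
        by_cases hp : a ≠ (none, none) <;> simp [hp]
    rw [hsplit, hitsFrom_cons, List.reverse_append, List.map_append]
    congr 1
    · rw [ih, hitsFrom_shift tl (0 + 1), ← List.map_reverse, List.map_map]
      apply List.map_congr_left
      intro j _
      simp only [Function.comp, List.length_cons]
      push_cast
      ring
    · by_cases hp : a ≠ (none, none) <;> simp [hp, List.length_cons]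

-- every hit index is a genuine position of data
lemma mem_hitsFrom_range (data : List (Option Int × Option Int)) (j : Int)
    (h : j ∈ hitsFrom data 0) : 0 ≤ j ∧ j < (data.length : Int) := by
  unfold hitsFrom at h
  obtain ⟨p, hpmem, hpj⟩ := List.mem_map.mp h
  have hpmem' := (List.mem_filter.mp hpmem).1
  obtain ⟨k, hk, hpe⟩ := (PySem.List.mem_enumerate_iff _ _ _).mp hpmem'
  subst hpe
  simp only [zero_add] at hpj
  have hkl : (k : Int) < (data.length : Int) := by exact_mod_cast hk
  omega

-- B's port with its lets zeta-reduced and hits named hitsFrom (definitional)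
def altView (data : List (Option Int × Option Int)) (num : Int) : (Option Int × Option Int) × Int :=
  if 1 ≤ num ∧ num ≤ (((hitsFrom data 0).length : Nat) : Int) then
    ((PySem.List.pyGet? data ((PySem.List.pyGet? (hitsFrom data 0) (-num)).getD 0)).getD (none, none),
      (PySem.List.pyGet? (hitsFrom data 0) (-num)).getD 0 - (data.length : Int))
  else ((none, none), -((data.length : Int) + 1))

lemma alt_eq (data : List (Option Int × Option Int)) (num : Int) :
    get_prev_c_alt data num = altView data num := rfl

-- the final bridge: A's selection equals B's value
lemma select_eq_altView (data : List (Option Int × Option Int)) (num : Int) :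
    selectFrom data num 1 = altView data num := by
  unfold selectFrom altView
  rw [matches_eq_hits data]
  set hits := hitsFrom data 0 with hhits
  simp only [List.length_map, List.length_reverse]
  by_cases hg : 1 ≤ num ∧ num ≤ (hits.length : Int)
  · rw [if_pos hg, if_pos hg]
    obtain ⟨hg1, hg2⟩ := hg
    obtain ⟨k, rfl⟩ : ∃ k : Nat, num = (k : Int) + 1 := ⟨(num - 1).toNat, by omega⟩
    have hklen : k < hits.length := by exact_mod_cast (by omega : (k : Int) < (hits.length : Int))
    have hA : PySem.List.pyGet? ((hits.reverse).map (fun j => (data.length : Int) - j)) ((k : Int) + 1 - 1)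
        = some ((data.length : Int) - hits[hits.length - 1 - k]) := by
      rw [show ((k : Int) + 1 - 1) = ((k : Nat) : Int) from by ring,
          PySem.List.pyGet?_natCast, List.getElem?_map, List.getElem?_reverse hklen,
          List.getElem?_eq_getElem (by omega)]
      rfl
    have hB : PySem.List.pyGet? hits (-((k : Int) + 1)) = some hits[hits.length - 1 - k] := by
      rw [show (-((k : Int) + 1)) = -(((k + 1 : Nat) : Int)) from by push_cast; ring,
          PySem.List.pyGet?_neg_natCast hits (k + 1) (by omega) (by omega),
          show hits.length - (k + 1) = hits.length - 1 - k from by omega,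
          List.getElem?_eq_getElem (by omega)]
    rw [hA, hB]
    simp only [Option.getD_some]
    have hmem : hits[hits.length - 1 - k] ∈ hits := List.getElem_mem _
    have hrange := mem_hitsFrom_range data _ hmem
    simp only [Prod.mk.injEq]
    constructor
    · -- the centers agree: data[-(len-j)] = data[j]
      obtain ⟨jn, hjn⟩ : ∃ jn : Nat, hits[hits.length - 1 - k] = (jn : Int) :=
        ⟨(hits[hits.length - 1 - k]).toNat, by omega⟩
      rw [hjn]
      have hjl : jn < data.length := by exact_mod_cast (hjn ▸ hrange.2)
      rw [show (data.length : Int) - (jn : Int) = ((data.length - jn : Nat) : Int) from by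
            push_cast [Nat.cast_sub (le_of_lt hjl)]; ring,
          PySem.List.pyGet?_neg_natCast data (data.length - jn) (by omega) (by omega),
          PySem.List.pyGet?_natCast]
      congr 2
      omega
    · ring
  · rw [if_neg hg, if_neg hg]

-- ===== VERDICT (by name: the statement is the Claim_ definition above) =====
theorem get_prev_c_spec : Claim_equal_get_prev_c := by
  intro data num _
  unfold Spec_get_prev_c get_prev_c
  rw [loop_eq_select_fuel data num data.length 1 0 (by omega) (by omega) (by omega)]
  rw [show num - 0 = num from by ring, alt_eq]
  exact select_eq_altView data num
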